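-- pv_equiv track=rewrite | github.com/songbowang125/SVision-pro | src/color_plot.py | get_drawable_op_color
-- ===== SOURCE A (Python) =====
-- OP_COLOR_DICT = {"M": [0, 0, 0],
--                  "A": [135, 206, 255],
--                   "T": [135, 206, 255],
--                   "C": [135, 206, 255],
--                   "G": [135, 206, 255],
--                  "N": [227, 227, 227],
--                  "REF": [66, 146, 197],
--                  "I": [251, 246, 180],
--                  "D": [253, 229, 217],
--                  "DP": [235, 150, 69],
--                  "V": [127, 206, 187],
--                  }
--
-- inv_channel = 1
--
-- dup_channel = 0
--
-- def get_drawable_op_color(op, channel):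
--     """
--     generate drawable op color with different channels
--     """
--
--     op = op.upper()
--
--     op_color = OP_COLOR_DICT[op].copy()
--
--     if channel == "inv_channel":
--         op_color[inv_channel] -= 100
--
--     elif channel == "dup_channel":
--         op_color[dup_channel] -= 100
--
--     elif channel == "invdup_channel":
--         op_color[inv_channel] -= 100
--         op_color[dup_channel] -= 100
--
--     # # change channel values that are smaller than 0 to 0
--     for i in range(len(op_color)):
--         if op_color[i] < 0:
--             op_color[i] = 0
--
--     return op_color
-- ===== SOURCE B (Python) =====
-- OP_COLOR_DICT = {"M": [0, 0, 0],
--                  "A": [135, 206, 255],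
--                   "T": [135, 206, 255],
--                   "C": [135, 206, 255],
--                   "G": [135, 206, 255],
--                  "N": [227, 227, 227],
--                  "REF": [66, 146, 197],
--                  "I": [251, 246, 180],
--                  "D": [253, 229, 217],
--                  "DP": [235, 150, 69],
--                  "V": [127, 206, 187]}
--
-- inv_channel = 1
-- dup_channel = 0
--
-- # per-channel-variant decrement vectors (index -> amount); "" = any other channel
-- _CHANNEL_DELTAS = [("", [0, 0, 0]),
--                    ("inv_channel", [0, 100, 0]),
--                    ("dup_channel", [100, 0, 0]),
--                    ("invdup_channel", [100, 100, 0])]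
--
-- def _build_color_table():
--     # precompute every (op, channel-variant) answer once, clamped at 0
--     table = {}
--     for op, base in OP_COLOR_DICT.items():
--         for ch, deltas in _CHANNEL_DELTAS:
--             table[(op, ch)] = [max(0, v - d) for v, d in zip(base, deltas)]
--     return table
--
-- _COLOR_TABLE = _build_color_table()
-- _CHANNELS = ("inv_channel", "dup_channel", "invdup_channel")
--
-- def get_drawable_op_color(op, channel):
--     """
--     generate drawable op color with different channels (precomputed lookup table)
--     """
--     key = channel if channel in _CHANNELS else ""
--     return list(_COLOR_TABLE[(op.upper(), key)])
-- ===== Notes on version B (the rewrite author's own statement) =====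
-- stated objective: alternative
-- what changed: All 44 (op, channel-variant) answers are precomputed once into a module-level lookup table (clamped at build time), so the call itself does no arithmetic and no branching on values: it normalizes the channel to a table key and returns a copy of the stored list, instead of A's per-call if/elif mutation plus clamp loop.
import Mathlib
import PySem

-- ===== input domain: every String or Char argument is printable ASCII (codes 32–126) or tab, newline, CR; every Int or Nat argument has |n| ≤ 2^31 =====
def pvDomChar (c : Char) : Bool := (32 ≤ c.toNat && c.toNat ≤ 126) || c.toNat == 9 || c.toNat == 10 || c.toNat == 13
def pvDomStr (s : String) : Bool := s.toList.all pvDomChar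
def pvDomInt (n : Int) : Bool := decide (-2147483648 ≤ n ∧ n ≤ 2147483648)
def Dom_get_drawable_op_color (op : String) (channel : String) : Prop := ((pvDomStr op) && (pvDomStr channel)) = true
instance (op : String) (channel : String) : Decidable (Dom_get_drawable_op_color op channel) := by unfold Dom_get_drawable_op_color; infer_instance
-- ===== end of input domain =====

-- B precomputes all (op, channel-variant) answers into one lookup table at module load; the call
-- only normalizes the channel key and returns the stored list (objective: alternative).

-- ===== PORT A =====
def pvOpColorDict : PySem.Dict String (List Int) :=
  PySem.Dict.ofList [("M", [0, 0, 0]), ("A", [135, 206, 255]), ("T", [135, 206, 255]),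
    ("C", [135, 206, 255]), ("G", [135, 206, 255]), ("N", [227, 227, 227]),
    ("REF", [66, 146, 197]), ("I", [251, 246, 180]), ("D", [253, 229, 217]),
    ("DP", [235, 150, 69]), ("V", [127, 206, 187])]

def pvInvChannel : Int := 1
def pvDupChannel : Int := 0

-- op_color[i] -= 100 (index always nonneg and in range here; pyGetD/pySetD are exact under that)
def pvDec (l : List Int) (i : Int) : List Int :=
  PySem.List.pySetD l i (PySem.List.pyGetD l i 0 - 100)

def get_drawable_op_color (op : String) (channel : String) : List Int :=
  let opU := PySem.Str.upper op
  match pvOpColorDict.get? opU with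
  | none => []   -- KeyError in Python: excluded by Pre_
  | some opc0 =>
    let opc1 :=
      if channel == "inv_channel" then pvDec opc0 pvInvChannel
      else if channel == "dup_channel" then pvDec opc0 pvDupChannel
      else if channel == "invdup_channel" then pvDec (pvDec opc0 pvInvChannel) pvDupChannel
      else opc0
    (PySem.List.pyRange 0 (opc1.length : Int) 1).foldl
      (fun acc i => if PySem.List.pyGetD acc i 0 < 0 then PySem.List.pySetD acc i 0 else acc) opc1

-- ===== PORT B =====
def pvChannelDeltas : List (String × List Int) :=
  [("", [0, 0, 0]), ("inv_channel", [0, 100, 0]), ("dup_channel", [100, 0, 0]),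
   ("invdup_channel", [100, 100, 0])]

-- _build_color_table(): nested loop over dict items and channel variants, clamped at build time
def pvColorTable : PySem.Dict (String × String) (List Int) :=
  pvOpColorDict.items.foldl (fun t p =>
    pvChannelDeltas.foldl (fun t q =>
      t.insert (p.1, q.1) ((p.2.zip q.2).map (fun vd => max 0 (vd.1 - vd.2)))) t)
    PySem.Dict.empty

def get_drawable_op_color_alt (op : String) (channel : String) : List Int :=
  let key := if channel ∈ ["inv_channel", "dup_channel", "invdup_channel"] then channel else ""
  match pvColorTable.get? (PySem.Str.upper op, key) with
  | none => []   -- KeyError in Python: excluded by Pre_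
  | some l => l   -- list(...) copies; value identical

-- ===== PRECONDITION & SPEC =====
-- Pre_ excludes exactly the ops whose upper-case form is not a key of OP_COLOR_DICT: there A raises KeyError.
def Pre_get_drawable_op_color (op : String) (channel : String) : Prop :=
  PySem.Str.upper op ∈ ["M", "A", "T", "C", "G", "N", "REF", "I", "D", "DP", "V"]
instance (op : String) (channel : String) : Decidable (Pre_get_drawable_op_color op channel) := by unfold Pre_get_drawable_op_color; infer_instance

def pvWitness_get_drawable_op_color : String × String := ("ref", "inv_channel")

def Spec_get_drawable_op_color (op : String) (channel : String) (out : List Int) : Prop := out = get_drawable_op_color_alt op channel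
instance (op : String) (channel : String) (out : List Int) : Decidable (Spec_get_drawable_op_color op channel out) := by unfold Spec_get_drawable_op_color; infer_instance

-- ===== CLAIM (what is proved, stated in full; the proofs are below) =====
def Claim_equal_get_drawable_op_color : Prop := ∀ (op : String) (channel : String), Dom_get_drawable_op_color op channel → Pre_get_drawable_op_color op channel → Spec_get_drawable_op_color op channel (get_drawable_op_color op channel)

-- ===== LEMMAS AND PROOFS =====

-- both ports depend on channel only through the four dispatch tests; for each valid key and each
-- of the four channel classes the two closed computations agree
set_option maxRecDepth 8192 in
theorem pv_core_eq (k channel : String)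
    (hk : k ∈ ["M", "A", "T", "C", "G", "N", "REF", "I", "D", "DP", "V"]) :
    (match pvOpColorDict.get? k with
      | none => []
      | some opc0 =>
        let opc1 :=
          if channel == "inv_channel" then pvDec opc0 pvInvChannel
          else if channel == "dup_channel" then pvDec opc0 pvDupChannel
          else if channel == "invdup_channel" then pvDec (pvDec opc0 pvInvChannel) pvDupChannel
          else opc0
        (PySem.List.pyRange 0 (opc1.length : Int) 1).foldl
          (fun acc i => if PySem.List.pyGetD acc i 0 < 0 then PySem.List.pySetD acc i 0 else acc) opc1) =
    (let key := if channel ∈ ["inv_channel", "dup_channel", "invdup_channel"] then channel else ""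
     match pvColorTable.get? (k, key) with
      | none => []
      | some l => l) := by
  by_cases h1 : channel = "inv_channel"
  · subst h1; fin_cases hk <;> decide
  · by_cases h2 : channel = "dup_channel"
    · subst h2; fin_cases hk <;> decide
    · by_cases h3 : channel = "invdup_channel"
      · subst h3; fin_cases hk <;> decide
      · have b1 : (channel == "inv_channel") = false := by simp [h1]
        have b2 : (channel == "dup_channel") = false := by simp [h2]
        have b3 : (channel == "invdup_channel") = false := by simp [h3]
        have hkey : (if channel ∈ ["inv_channel", "dup_channel", "invdup_channel"] then channel else "") = "" := by
          simp [h1, h2, h3]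
        simp only [b1, b2, b3, hkey]
        fin_cases hk <;> decide

-- ===== VERDICT (by name: the statement is the Claim_ definition above) =====
theorem get_drawable_op_color_spec : Claim_equal_get_drawable_op_color := by
  intro op channel _ hpre
  unfold Pre_get_drawable_op_color at hpre
  unfold Spec_get_drawable_op_color get_drawable_op_color get_drawable_op_color_alt
  exact pv_core_eq (PySem.Str.upper op) channel hpre
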